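-- pv_equiv track=rewrite | github.com/greenblat/vlsistuff | pybin3/insts.py | build_expr
-- ===== SOURCE A (Python) =====
-- OpcodeWidth=25
--
-- def build_expr(Coding):
--     mask=''
--     data=''
--     for X in Coding:
--         if (X=='1'):
--             mask=mask+'1'
--             data=data+'1'
--         elif (X=='0'):
--             mask=mask+'1'
--             data=data+'0'
--         else:
--             mask=mask+'0'
--             data=data+'0'
--     return ( str(OpcodeWidth)+"'h"+bin2hex(mask),str(OpcodeWidth)+"'h"+bin2hex(data) )
--
-- def bin2hex(Bin):
--     res = ''
--     while ((len(Bin)%4)!=0):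
--         Bin='0'+Bin
--     while 1:
--         X = Bin[-4:]
--         Bin=Bin[:-4]
--         S = '%x'%(int(X,2))
--         res =S+res
--         if (len(Bin)==0):
--             return res
-- ===== SOURCE B (Python) =====
-- OpcodeWidth = 25
--
-- def build_expr(Coding):
--     mask = 0
--     data = 0
--     for c in Coding:
--         mask = mask * 2 + (c in '01')
--         data = data * 2 + (c == '1')
--     n = (len(Coding) + 3) // 4
--     pre = str(OpcodeWidth) + "'h"
--     return (pre + format(mask, '0%dx' % n), pre + format(data, '0%dx' % n))
-- ===== Notes on version B (the rewrite author's own statement) =====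
-- stated objective: faster
-- what changed: B accumulates the mask/data as integers in one pass and formats each with a zero-padded hex format of width ceil(len/4), replacing A's quadratic character-by-character string concatenation and the manual bin2hex pad-and-slice nibble loop.
-- crash fix: On the empty string A raises ValueError (int('',2) inside bin2hex); B returns ("25'h0", "25'h0"). — e.g. on build_expr(""): A raises ValueError, B returns ("25'h0", "25'h0")
import Mathlib
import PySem

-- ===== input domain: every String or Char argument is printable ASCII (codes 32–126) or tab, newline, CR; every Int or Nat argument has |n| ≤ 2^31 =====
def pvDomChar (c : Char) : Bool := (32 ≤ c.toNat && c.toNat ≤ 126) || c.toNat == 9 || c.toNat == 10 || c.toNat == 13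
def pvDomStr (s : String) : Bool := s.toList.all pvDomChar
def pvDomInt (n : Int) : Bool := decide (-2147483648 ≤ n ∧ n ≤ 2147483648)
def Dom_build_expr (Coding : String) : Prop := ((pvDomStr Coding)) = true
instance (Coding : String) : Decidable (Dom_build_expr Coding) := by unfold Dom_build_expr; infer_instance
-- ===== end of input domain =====

-- B builds the two bitmasks as integers in one pass and formats them as zero-padded
-- hex of width ceil(len/4), replacing A's string concatenation and manual bin2hex loop.


-- ===== PORT A =====

def OpcodeWidth : Int := 25

-- lowercase hex digit, as '%x' % v produces for 0 ≤ v < 16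
def hexDigit (v : Nat) : Char :=
  (("0123456789abcdef".toList).getD v '0')

-- int(X, 2) for a string of '0'/'1' chars; A only ever calls it on such strings,
-- except int('',2) which raises (modelled by the isEmpty → none branch in hexLoopA)
def binVal (l : List Char) : Nat :=
  l.foldl (fun a c => 2 * a + (if c = '1' then 1 else 0)) 0

-- 'while ((len(Bin)%4)!=0): Bin = '0'+Bin'
def padLoopA (bin : List Char) : List Char :=
  if bin.length % 4 ≠ 0 then padLoopA ('0' :: bin) else bin
termination_by (4 - bin.length % 4) % 4
decreasing_by simp only [List.length_cons]; omega

-- 'while 1: X=Bin[-4:]; Bin=Bin[:-4]; S='%x'%int(X,2); res=S+res; if len(Bin)==0: return res'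
-- none = the ValueError of int('',2), reached exactly when the loop starts on an empty Bin
def hexLoopA (bin : List Char) (res : List Char) : Option (List Char) :=
  if bin.isEmpty then none
  else
    let X := bin.drop (bin.length - 4)
    let bin' := bin.take (bin.length - 4)
    let res' := hexDigit (binVal X) :: res
    if bin'.length = 0 then some res' else hexLoopA bin' res'
termination_by bin.length
decreasing_by
  rename_i h _
  have hne : bin ≠ [] := by simpa [List.isEmpty_iff] using h
  have : 0 < bin.length := List.length_pos_of_ne_nil hne
  simp only [List.length_take]
  omega

def bin2hexA (bin : List Char) : Option (List Char) :=
  hexLoopA (padLoopA bin) []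

def build_expr (Coding : String) : String × String :=
  let md := Coding.toList.foldl
    (fun (p : List Char × List Char) X =>
      if X = '1' then (p.1 ++ ['1'], p.2 ++ ['1'])
      else if X = '0' then (p.1 ++ ['1'], p.2 ++ ['0'])
      else (p.1 ++ ['0'], p.2 ++ ['0'])) ([], [])
  let pre := (PySem.Int.toStr OpcodeWidth).toList ++ "'h".toList
  (String.ofList (pre ++ (bin2hexA md.1).getD []),
   String.ofList (pre ++ (bin2hexA md.2).getD []))

-- ===== PORT B =====

-- hex digits of v, big-endian, no leading zeros (empty for 0): core of format(v,'x')
def hexCore (v : Nat) : List Char :=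
  if v = 0 then [] else hexCore (v / 16) ++ [hexDigit (v % 16)]

-- format(v, '0n x'): lowercase hex of v, left-padded with '0' to width n
def fmtHex (n v : Nat) : List Char :=
  let h := if v = 0 then ['0'] else hexCore v
  List.replicate (n - h.length) '0' ++ h

def build_expr_alt (Coding : String) : String × String :=
  let md := Coding.toList.foldl
    (fun (p : Nat × Nat) c =>
      (p.1 * 2 + (if c = '0' ∨ c = '1' then 1 else 0),
       p.2 * 2 + (if c = '1' then 1 else 0))) (0, 0)
  let n := (Coding.toList.length + 3) / 4
  let pre := (PySem.Int.toStr OpcodeWidth).toList ++ "'h".toList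
  (String.ofList (pre ++ fmtHex n md.1), String.ofList (pre ++ fmtHex n md.2))

-- ===== PRECONDITION & SPEC =====
-- Pre_ excludes only the empty string, on which A raises ValueError (int('',2)).
def Pre_build_expr (Coding : String) : Prop := Coding ≠ ""
instance (Coding : String) : Decidable (Pre_build_expr Coding) := by unfold Pre_build_expr; infer_instance
def pvWitness_build_expr : String := "10xx1"

-- On the empty string A raises ValueError (int('',2) inside bin2hex); B returns ("25'h0", "25'h0").
def Raises_build_expr (Coding : String) : Prop := Coding = ""
instance (Coding : String) : Decidable (Raises_build_expr Coding) := by unfold Raises_build_expr; infer_instance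
def pvRaiseWitness_build_expr : String := ""
def pvRaiseWitnessOut_build_expr : String × String := ("25'h0", "25'h0")

def Spec_build_expr (Coding : String) (out : String × String) : Prop := out = build_expr_alt Coding
instance (Coding : String) (out : String × String) : Decidable (Spec_build_expr Coding out) := by unfold Spec_build_expr; infer_instance

-- ===== CLAIM (what is proved, stated in full; the proofs are below) =====
def Claim_equal_build_expr : Prop := ∀ (Coding : String), Dom_build_expr Coding → Pre_build_expr Coding → Spec_build_expr Coding (build_expr Coding)
def Claim_raises_build_expr : Prop := (∀ (Coding : String), Dom_build_expr Coding → Raises_build_expr Coding → ¬ Pre_build_expr Coding) ∧ (Dom_build_expr (pvRaiseWitness_build_expr) ∧ Raises_build_expr (pvRaiseWitness_build_expr) ∧ build_expr_alt (pvRaiseWitness_build_expr) = pvRaiseWitnessOut_build_expr)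

-- ===== LEMMAS AND PROOFS =====

def mchar (c : Char) : Char := if c = '1' ∨ c = '0' then '1' else '0'
def dchar (c : Char) : Char := if c = '1' then '1' else '0'

theorem foldA (l : List Char) (m d : List Char) :
    l.foldl (fun (p : List Char × List Char) X =>
      if X = '1' then (p.1 ++ ['1'], p.2 ++ ['1'])
      else if X = '0' then (p.1 ++ ['1'], p.2 ++ ['0'])
      else (p.1 ++ ['0'], p.2 ++ ['0'])) (m, d)
    = (m ++ l.map mchar, d ++ l.map dchar) := by
  induction l generalizing m d with
  | nil => simp
  | cons c t ih =>
    simp only [List.foldl_cons, List.map_cons]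
    by_cases h1 : c = '1' <;> by_cases h0 : c = '0' <;>
      simp [h1, h0, mchar, dchar, ih]

theorem binVal_from (l : List Char) (a : Nat) :
    l.foldl (fun a c => 2 * a + (if c = '1' then 1 else 0)) a
    = a * 2 ^ l.length + binVal l := by
  induction l generalizing a with
  | nil => simp [binVal]
  | cons c t ih =>
    have h0 := ih (2 * 0 + (if c = '1' then 1 else 0))
    have ha := ih (2 * a + (if c = '1' then 1 else 0))
    simp only [List.foldl_cons, List.length_cons]
    rw [ha]
    have hb : binVal (c :: t) = (2 * 0 + (if c = '1' then 1 else 0)) * 2 ^ t.length + binVal t := by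
      simpa [binVal] using h0
    rw [hb]
    generalize (if c = '1' then (1:Nat) else 0) = i
    ring

theorem binVal_cons (c : Char) (t : List Char) :
    binVal (c :: t) = (if c = '1' then 1 else 0) * 2 ^ t.length + binVal t := by
  show List.foldl _ (2 * 0 + (if c = '1' then 1 else 0)) t = _
  rw [binVal_from]
  simp

theorem binVal_append (a b : List Char) :
    binVal (a ++ b) = binVal a * 2 ^ b.length + binVal b := by
  simp only [binVal, List.foldl_append]
  exact binVal_from b _

theorem binVal_lt (l : List Char) : binVal l < 2 ^ l.length := by
  induction l with
  | nil => simp [binVal]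
  | cons c t ih =>
    rw [binVal_cons]
    simp only [List.length_cons, pow_succ]
    split <;> omega

theorem binVal_replicate_zero (k : Nat) (l : List Char) :
    binVal (List.replicate k '0' ++ l) = binVal l := by
  rw [binVal_append]
  have : binVal (List.replicate k '0') = 0 := by
    induction k with
    | zero => simp [binVal]
    | succ n ih => rw [List.replicate_succ, binVal_cons]; simp [ih]
  simp [this]

theorem foldB (l : List Char) (a b : Nat) :
    l.foldl (fun (p : Nat × Nat) c =>
      (p.1 * 2 + (if c = '0' ∨ c = '1' then 1 else 0),
       p.2 * 2 + (if c = '1' then 1 else 0))) (a, b)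
    = (a * 2 ^ l.length + binVal (l.map mchar),
       b * 2 ^ l.length + binVal (l.map dchar)) := by
  induction l generalizing a b with
  | nil => simp [binVal]
  | cons c t ih =>
    simp only [List.foldl_cons, List.map_cons, List.length_cons]
    rw [ih, binVal_cons, binVal_cons]
    have hm : mchar c = '1' ↔ (c = '0' ∨ c = '1') := by
      unfold mchar; split <;> simp_all [or_comm]
    simp only [Prod.mk.injEq, List.length_map]
    constructor
    · by_cases h : c = '0' ∨ c = '1'
      · rw [if_pos (hm.mpr h), if_pos h]; ring
      · rw [if_neg (fun hc => h (hm.mp hc)), if_neg h]; ring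
    · by_cases h : c = '1' <;> simp [dchar, h] <;> ring

theorem padLoopA_eq (l : List Char) :
    padLoopA l = List.replicate ((4 - l.length % 4) % 4) '0' ++ l := by
  induction l using padLoopA.induct with
  | case1 l h ih =>
    rw [padLoopA, if_pos h, ih]
    have hk : (4 - l.length % 4) % 4 = (4 - ('0'::l).length % 4) % 4 + 1 := by
      simp only [List.length_cons]; omega
    rw [hk, List.replicate_succ', List.append_assoc]
    rfl
  | case2 l h =>
    rw [padLoopA, if_neg h]
    simp only [ne_eq, not_not] at h
    simp [h]

-- hexN n v = the n low-order hex digits of v, big-endian (what A's nibble loop builds)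
def hexN (n v : Nat) : List Char :=
  match n with
  | 0 => []
  | n + 1 => hexN n (v / 16) ++ [hexDigit (v % 16)]

theorem hexLoopA_eq (k : Nat) : ∀ (bin res : List Char),
    bin.length = 4 * (k + 1) →
    hexLoopA bin res = some (hexN (k + 1) (binVal bin) ++ res) := by
  induction k with
  | zero =>
    intro bin res hl
    rw [hexLoopA]
    have hne : bin.isEmpty = false := by
      cases bin <;> simp_all
    rw [if_neg (by simp [hne])]
    simp only [hl]
    norm_num [hexN]
    have : binVal bin % 16 = binVal bin := by
      have := binVal_lt bin
      rw [hl] at this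
      omega
    rw [this]
  | succ k ih =>
    intro bin res hl
    rw [hexLoopA]
    have hne : bin.isEmpty = false := by
      cases bin <;> simp_all
    rw [if_neg (by simp [hne])]
    simp only
    have hsplit : bin = bin.take (bin.length - 4) ++ bin.drop (bin.length - 4) :=
      (List.take_append_drop _ _).symm
    have hlt : (bin.take (bin.length - 4)).length = 4 * (k + 1) := by
      simp only [List.length_take, hl]; omega
    have hld : (bin.drop (bin.length - 4)).length = 4 := by
      simp only [List.length_drop, hl]; omega
    rw [if_neg (by omega)]
    rw [ih _ _ hlt]
    have hv : binVal bin = binVal (bin.take (bin.length - 4)) * 16 + binVal (bin.drop (bin.length - 4)) := by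
      conv_lhs => rw [hsplit]
      rw [binVal_append, hld]
      norm_num
    have hx : binVal (bin.drop (bin.length - 4)) < 16 := by
      have := binVal_lt (bin.drop (bin.length - 4))
      rw [hld] at this; exact this
    have hdiv : binVal bin / 16 = binVal (bin.take (bin.length - 4)) := by omega
    have hmod : binVal bin % 16 = binVal (bin.drop (bin.length - 4)) := by omega
    rw [show hexN (k + 1 + 1) (binVal bin) = hexN (k+1) (binVal bin / 16) ++ [hexDigit (binVal bin % 16)] from rfl]
    rw [hdiv, hmod]
    simp

theorem hexN_zero (n : Nat) : hexN n 0 = List.replicate n '0' := by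
  induction n with
  | zero => rfl
  | succ n ih =>
    rw [hexN, Nat.zero_div, ih, List.replicate_succ']
    rfl

theorem hexCore_eq (v : Nat) (hv : v ≠ 0) (hlt : v < 16) : hexCore v = [hexDigit v] := by
  rw [hexCore, if_neg hv, Nat.div_eq_of_lt hlt, hexCore, if_pos rfl,
      Nat.mod_eq_of_lt hlt]
  rfl

theorem fmtHex_eq_hexN (n v : Nat) (hn : 1 ≤ n) (hv : v < 16 ^ n) :
    fmtHex n v = hexN n v := by
  induction n generalizing v with
  | zero => omega
  | succ n ih =>
    by_cases h0 : v = 0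
    · subst h0
      simp [hexN_zero, fmtHex, List.replicate_succ']
    · by_cases h16 : v < 16
      · rw [fmtHex]
        simp only [if_neg h0, hexCore_eq v h0 h16]
        rw [hexN, Nat.div_eq_of_lt h16, hexN_zero, Nat.mod_eq_of_lt h16]
        simp
      · have hn1 : 1 ≤ n := by
          by_contra hc
          have : n = 0 := by omega
          subst this
          norm_num at hv
          omega
        have hvd : v / 16 < 16 ^ n := by
          rw [Nat.div_lt_iff_lt_mul (by norm_num)]
          calc v < 16 ^ (n + 1) := hv
            _ = 16 ^ n * 16 := by ring
        have hd0 : v / 16 ≠ 0 := by omega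
        have hcv : hexCore v = hexCore (v / 16) ++ [hexDigit (v % 16)] := by
          rw [hexCore, if_neg h0]
        have hrec := ih (v / 16) hn1 hvd
        rw [hexN, ← hrec]
        rw [fmtHex, fmtHex]
        simp only [if_neg h0, if_neg hd0, hcv, List.length_append, List.length_cons,
          List.length_nil]
        rw [List.append_assoc]
        congr 2
        omega

theorem bin2hex_main (bits : List Char) (hne : bits ≠ []) :
    (bin2hexA bits).getD [] = fmtHex ((bits.length + 3) / 4) (binVal bits) := by
  have hL : 0 < bits.length := List.length_pos_of_ne_nil hne
  have hpad := padLoopA_eq bits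
  have hlen : (padLoopA bits).length = 4 * ((bits.length + 3) / 4) := by
    rw [hpad]
    simp only [List.length_append, List.length_replicate]
    omega
  obtain ⟨k, hk⟩ : ∃ k, (bits.length + 3) / 4 = k + 1 := ⟨(bits.length + 3) / 4 - 1, by omega⟩
  unfold bin2hexA
  rw [hexLoopA_eq k _ [] (by rw [hlen, hk])]
  simp only [Option.getD_some, List.append_nil]
  rw [hpad, binVal_replicate_zero, hk]
  rw [fmtHex_eq_hexN _ _ (by omega)]
  calc binVal bits < 2 ^ bits.length := binVal_lt bits
    _ ≤ 2 ^ (4 * (k + 1)) := Nat.pow_le_pow_right (by norm_num) (by omega)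
    _ = 16 ^ (k + 1) := by rw [show (16 : Nat) = 2 ^ 4 from rfl, ← pow_mul]

-- ===== VERDICT (by name: the statement is the Claim_ definition above) =====
theorem build_expr_spec : Claim_equal_build_expr := by
  intro Coding _ hpre
  unfold Spec_build_expr build_expr build_expr_alt
  have hl : Coding.toList ≠ [] := fun h => hpre (String.toList_eq_nil_iff.mp h)
  rw [foldA, foldB]
  simp only [List.nil_append, Nat.zero_mul, Nat.zero_add]
  rw [bin2hex_main _ (by simpa using hl), bin2hex_main _ (by simpa using hl)]
  simp only [List.length_map]

def build_expr_raises : Claim_raises_build_expr := by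
  unfold Claim_raises_build_expr
  exact ⟨fun C _ h => by simp [Raises_build_expr, Pre_build_expr] at *; exact h, by decide⟩
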